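-- pv_equiv track=rewrite | github.com/qurit/pca-lesion-seg | read_files.py | get_neighboring_slices
-- ===== SOURCE A (Python) =====
-- def get_neighboring_slices(imNumber,inputList_flat,neighbor_num):
--     filename_input=inputList_flat[imNumber] # the center slice
--     start_index,end_index=imNumber-neighbor_num,imNumber+neighbor_num
--     slices=[]
--     before_center_slice=True
--     num_slice_from_prev_patient=0
--     slice_index=start_index
--     # count neighboring slices belong to the previous patient, replace these slices with the first slice from the current patient
--     while slice_index<imNumber and inputList_flat[slice_index].split('/')[0]!=filename_input.split('/')[0]:
--         slice_index+=1
--         num_slice_from_prev_patient+=1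
--     if num_slice_from_prev_patient>0: slices=[inputList_flat[slice_index]]*num_slice_from_prev_patient
--     while slice_index<min(end_index+1,len(inputList_flat)) and inputList_flat[slice_index].split('/')[0]==filename_input.split('/')[0]:
--         slices.append(inputList_flat[slice_index])
--         slice_index+=1
--     # If there are neighboring slices from the next patient, replace these with the last slice from the current patient.
--     if slice_index!=end_index+1:
--         num_slice_from_nex_patient=end_index+1-slice_index
--         slices+=[inputList_flat[slice_index-1]]*num_slice_from_nex_patient
--     return slices
-- ===== SOURCE B (Python) =====
-- def get_neighboring_slices(imNumber, inputList_flat, neighbor_num):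
--     patient = inputList_flat[imNumber].split('/')[0]
--     start, end = imNumber - neighbor_num, imNumber + neighbor_num
--     # lo: first position in [start, imNumber] belonging to the center patient
--     lo = start
--     while lo < imNumber and inputList_flat[lo].split('/')[0] != patient:
--         lo += 1
--     # hi: last position of the contiguous same-patient run beginning at lo (capped at end / list length)
--     hi = lo
--     while hi + 1 < min(end + 1, len(inputList_flat)) and inputList_flat[hi + 1].split('/')[0] == patient:
--         hi += 1
--     return [inputList_flat[min(max(i, lo), hi)] for i in range(start, end + 1)]
-- ===== Notes on version B (the rewrite author's own statement) =====
-- stated objective: simpler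
-- what changed: B computes the two patient-boundary indices lo/hi first and then produces the window in one clamp comprehension [xs[min(max(i,lo),hi)] for i in range(start,end+1)], instead of A's incremental list building with a counted prefix replication, an append loop and a suffix replication.
import Mathlib
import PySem

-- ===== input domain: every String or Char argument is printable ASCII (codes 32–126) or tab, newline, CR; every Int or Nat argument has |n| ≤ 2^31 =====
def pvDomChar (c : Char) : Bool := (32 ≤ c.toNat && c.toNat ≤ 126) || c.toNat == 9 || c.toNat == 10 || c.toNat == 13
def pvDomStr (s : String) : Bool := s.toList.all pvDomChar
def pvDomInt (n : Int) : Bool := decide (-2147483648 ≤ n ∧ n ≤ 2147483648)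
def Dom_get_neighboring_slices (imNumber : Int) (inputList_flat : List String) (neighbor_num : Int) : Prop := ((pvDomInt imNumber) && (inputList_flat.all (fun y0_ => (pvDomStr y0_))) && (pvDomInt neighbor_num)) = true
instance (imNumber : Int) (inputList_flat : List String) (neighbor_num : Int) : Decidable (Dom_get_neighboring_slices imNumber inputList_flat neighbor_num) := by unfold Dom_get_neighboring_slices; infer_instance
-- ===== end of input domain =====

-- B computes the patient-boundary indices lo/hi first and then emits the window as one
-- clamp comprehension, instead of A's counted prefix replication + append loop + suffix
-- replication; same cost, simpler shape.


-- shared helpers: s.split('/')[0] and xs[i] (Python indexing; default "" is never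
-- reached inside Pre_)
def pvPat (s : String) : String := ((PySem.Str.split? s "/").getD []).headD ""
def pvGet (xs : List String) (i : Int) : String := (PySem.List.pyGet? xs i).getD ""

-- ===== PORT A =====
-- first while loop: advance past slices of the previous patient, counting them
def aLoop1 (xs : List String) (p : String) (imN : Int) : Nat → Int → Int → Int × Int
  | 0, i, cnt => (i, cnt)
  | k+1, i, cnt =>
    if i < imN ∧ pvPat (pvGet xs i) ≠ p then aLoop1 xs p imN k (i+1) (cnt+1) else (i, cnt)

-- second while loop: append the current patient's slices
def aLoop2 (xs : List String) (p : String) (bound : Int) : Nat → Int → List String → Int × List String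
  | 0, i, acc => (i, acc)
  | k+1, i, acc =>
    if i < bound ∧ pvPat (pvGet xs i) = p then aLoop2 xs p bound k (i+1) (acc ++ [pvGet xs i]) else (i, acc)

def get_neighboring_slices (imNumber : Int) (inputList_flat : List String) (neighbor_num : Int) : List String :=
  let filename_input := pvGet inputList_flat imNumber
  let start_index := imNumber - neighbor_num
  let end_index := imNumber + neighbor_num
  let r1 := aLoop1 inputList_flat (pvPat filename_input) imNumber (imNumber - start_index).toNat start_index 0
  let slices := if r1.2 > 0 then List.replicate r1.2.toNat (pvGet inputList_flat r1.1) else []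
  let bound := min (end_index + 1) (inputList_flat.length : Int)
  let r2 := aLoop2 inputList_flat (pvPat filename_input) bound (bound - r1.1).toNat r1.1 slices
  if r2.1 ≠ end_index + 1 then
    r2.2 ++ List.replicate (end_index + 1 - r2.1).toNat (pvGet inputList_flat (r2.1 - 1))
  else r2.2

-- ===== PORT B =====
-- lo: first position in [start, imNumber] belonging to the center patient
def bLoopLo (xs : List String) (p : String) (imN : Int) : Nat → Int → Int
  | 0, lo => lo
  | k+1, lo => if lo < imN ∧ pvPat (pvGet xs lo) ≠ p then bLoopLo xs p imN k (lo+1) else lo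

-- hi: last position of the contiguous same-patient run beginning at lo (capped)
def bLoopHi (xs : List String) (p : String) (bound : Int) : Nat → Int → Int
  | 0, hi => hi
  | k+1, hi => if hi + 1 < bound ∧ pvPat (pvGet xs (hi+1)) = p then bLoopHi xs p bound k (hi+1) else hi

def get_neighboring_slices_alt (imNumber : Int) (inputList_flat : List String) (neighbor_num : Int) : List String :=
  let patient := pvPat (pvGet inputList_flat imNumber)
  let start := imNumber - neighbor_num
  let endI := imNumber + neighbor_num
  let lo := bLoopLo inputList_flat patient imNumber (imNumber - start).toNat start
  let bound := min (endI + 1) (inputList_flat.length : Int)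
  let hi := bLoopHi inputList_flat patient bound (bound - 1 - lo).toNat lo
  (PySem.List.pyRange start (endI + 1) 1).map
    (fun i => pvGet inputList_flat (min (max i lo) hi))

-- ===== PRECONDITION & SPEC =====
-- Exactly the inputs on which the Python A returns (it raises IndexError elsewhere):
-- for neighbor_num ≥ 0, the center index and the window start must be in Python's index
-- range; for neighbor_num < 0 the center index and start-1 must be (A then returns []).
def Pre_get_neighboring_slices (imNumber : Int) (inputList_flat : List String) (neighbor_num : Int) : Prop :=
  (0 ≤ neighbor_num ∧ -(inputList_flat.length : Int) ≤ imNumber - neighbor_num ∧ imNumber < (inputList_flat.length : Int))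
  ∨ (neighbor_num < 0 ∧ -(inputList_flat.length : Int) ≤ imNumber ∧ imNumber < (inputList_flat.length : Int)
      ∧ -(inputList_flat.length : Int) ≤ imNumber - neighbor_num - 1 ∧ imNumber - neighbor_num - 1 < (inputList_flat.length : Int))
instance (imNumber : Int) (inputList_flat : List String) (neighbor_num : Int) : Decidable (Pre_get_neighboring_slices imNumber inputList_flat neighbor_num) := by unfold Pre_get_neighboring_slices; infer_instance

def pvWitness_get_neighboring_slices : Int × List String × Int := (2, ["a/1", "a/2", "b/1", "b/2"], 2)

def Spec_get_neighboring_slices (imNumber : Int) (inputList_flat : List String) (neighbor_num : Int) (out : List String) : Prop := out = get_neighboring_slices_alt imNumber inputList_flat neighbor_num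
instance (imNumber : Int) (inputList_flat : List String) (neighbor_num : Int) (out : List String) : Decidable (Spec_get_neighboring_slices imNumber inputList_flat neighbor_num out) := by unfold Spec_get_neighboring_slices; infer_instance

-- ===== CLAIM (what is proved, stated in full; the proofs are below) =====
def Claim_equal_get_neighboring_slices : Prop := ∀ (imNumber : Int) (inputList_flat : List String) (neighbor_num : Int), Dom_get_neighboring_slices imNumber inputList_flat neighbor_num → Pre_get_neighboring_slices imNumber inputList_flat neighbor_num → Spec_get_neighboring_slices imNumber inputList_flat neighbor_num (get_neighboring_slices imNumber inputList_flat neighbor_num)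

-- ===== LEMMAS AND PROOFS =====

-- aLoop1 is bLoopLo plus the step counter
theorem aLoop1_eq_bLoopLo (xs : List String) (p : String) (imN : Int) :
    ∀ (k : Nat) (i cnt : Int),
      aLoop1 xs p imN k i cnt = (bLoopLo xs p imN k i, cnt + (bLoopLo xs p imN k i - i)) := by
  intro k
  induction k with
  | zero => intro i cnt; simp [aLoop1, bLoopLo]
  | succ k ih =>
    intro i cnt
    simp only [aLoop1, bLoopLo]
    split_ifs with h
    · rw [ih]
      refine Prod.ext rfl ?_
      simp; ring
    · simp

-- bLoopLo lands between its start and imN, on a matching slice if strictly below imN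
theorem bLoopLo_bounds (xs : List String) (p : String) (imN : Int) :
    ∀ (k : Nat) (i : Int), i ≤ imN → (imN - i).toNat ≤ k →
      i ≤ bLoopLo xs p imN k i ∧ bLoopLo xs p imN k i ≤ imN ∧
        (bLoopLo xs p imN k i < imN → pvPat (pvGet xs (bLoopLo xs p imN k i)) = p) := by
  intro k
  induction k with
  | zero =>
    intro i h1 h2
    have : i = imN := by omega
    subst this
    simp [bLoopLo]
  | succ k ih =>
    intro i h1 h2
    simp only [bLoopLo]
    split_ifs with h
    · have := ih (i + 1) (by omega) (by omega)
      exact ⟨by omega, this.2.1, this.2.2⟩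
    · refine ⟨le_refl _, h1, fun hlt => ?_⟩
      by_contra hne
      exact h ⟨hlt, hne⟩

-- bLoopHi stays inside [start, bound)
theorem bLoopHi_bounds (xs : List String) (p : String) (bound : Int) :
    ∀ (k : Nat) (j : Int), j < bound →
      j ≤ bLoopHi xs p bound k j ∧ bLoopHi xs p bound k j < bound := by
  intro k
  induction k with
  | zero => intro j h; simp [bLoopHi]; omega
  | succ k ih =>
    intro j h
    simp only [bLoopHi]
    split_ifs with hc
    · have := ih (j + 1) hc.1
      exact ⟨by omega, this.2⟩
    · exact ⟨le_refl _, h⟩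

-- aLoop2, started on a matching slice, appends exactly the segment [j, bLoopHi … j]
theorem aLoop2_eq_bLoopHi (xs : List String) (p : String) (bound : Int) :
    ∀ (k : Nat) (j : Int) (acc : List String), j < bound → pvPat (pvGet xs j) = p →
      (bound - 1 - j).toNat ≤ k →
      aLoop2 xs p bound (k + 1) j acc =
        (bLoopHi xs p bound k j + 1,
          acc ++ (PySem.List.pyRange j (bLoopHi xs p bound k j + 1) 1).map (pvGet xs)) := by
  intro k
  induction k with
  | zero =>
    intro j acc hj hp hf
    have hj' : bound = j + 1 := by omega
    simp only [aLoop2, bLoopHi]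
    rw [if_pos ⟨hj, hp⟩]
    simp [PySem.List.pyRange_one_singleton]
  | succ k ih =>
    intro j acc hj hp hf
    have hstep : aLoop2 xs p bound (k + 1 + 1) j acc =
        aLoop2 xs p bound (k + 1) (j + 1) (acc ++ [pvGet xs j]) := by
      conv_lhs => rw [aLoop2]
      rw [if_pos ⟨hj, hp⟩]
    rw [hstep]
    by_cases hc : j + 1 < bound ∧ pvPat (pvGet xs (j + 1)) = p
    · rw [ih (j + 1) (acc ++ [pvGet xs j]) hc.1 hc.2 (by omega)]
      have hb : bLoopHi xs p bound (k + 1) j = bLoopHi xs p bound k (j + 1) := by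
        simp only [bLoopHi]; rw [if_pos hc]
      rw [hb]
      have hge := (bLoopHi_bounds xs p bound k (j + 1) hc.1).1
      rw [PySem.List.pyRange_one_cons (by omega : j < bLoopHi xs p bound k (j + 1) + 1)]
      simp
    · have ha : aLoop2 xs p bound (k + 1) (j + 1) (acc ++ [pvGet xs j]) =
          (j + 1, acc ++ [pvGet xs j]) := by
        simp only [aLoop2]; rw [if_neg hc]
      have hb : bLoopHi xs p bound (k + 1) j = j := by
        simp only [bLoopHi]; rw [if_neg hc]
      rw [ha, hb, PySem.List.pyRange_one_singleton]
      simp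

-- aLoop2 does nothing once the index has reached the bound
theorem aLoop2_done (xs : List String) (p : String) (bound : Int) :
    ∀ (k : Nat) (i : Int) (acc : List String), bound ≤ i →
      aLoop2 xs p bound k i acc = (i, acc) := by
  intro k i acc h
  cases k with
  | zero => simp [aLoop2]
  | succ k => simp only [aLoop2]; rw [if_neg (fun hc => absurd hc.1 (not_lt.mpr h))]

-- clamped comprehension over one segment of constant value
theorem map_clamp_const {α : Type} (f : Int → α) (c : α) (l : List Int)
    (h : ∀ i ∈ l, f i = c) : l.map f = List.replicate l.length c := by
  induction l with
  | nil => simp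
  | cons a t ih =>
    rw [List.map_cons, h a List.mem_cons_self, List.length_cons, List.replicate_succ,
      ih (fun i hi => h i (List.mem_cons_of_mem a hi))]

-- ===== VERDICT (by name: the statement is the Claim_ definition above) =====

theorem get_neighboring_slices_spec : Claim_equal_get_neighboring_slices := by
  intro imN xs n _ hPre
  unfold Spec_get_neighboring_slices
  simp only [get_neighboring_slices, get_neighboring_slices_alt]
  rcases hPre with ⟨hn, hs, hiL⟩ | ⟨hn, h1, h2, h3, h4⟩
  · -- main case: 0 ≤ neighbor_num
    set L : Int := (xs.length : Int) with hL
    set p := pvPat (pvGet xs imN) with hp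
    set start := imN - n with hstart
    set endI := imN + n with hend
    set bound := min (endI + 1) L with hbound
    set lo := bLoopLo xs p imN (imN - start).toNat start with hlo
    have hloB := bLoopLo_bounds xs p imN (imN - start).toNat start (by omega) (le_refl _)
    rw [← hlo] at hloB
    have hpLo : pvPat (pvGet xs lo) = p := by
      rcases lt_or_eq_of_le hloB.2.1 with h | h
      · exact hloB.2.2 h
      · rw [h]
    have hloBound : lo < bound := by
      have : imN < bound := by omega
      omega
    set k := (bound - 1 - lo).toNat with hk
    have hfu : (bound - lo).toNat = k + 1 := by omega
    rw [aLoop1_eq_bLoopLo, ← hlo, hfu,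
      aLoop2_eq_bLoopHi xs p bound k lo _ hloBound hpLo (le_refl _)]
    set hi := bLoopHi xs p bound k lo with hhi
    have hhiB := bLoopHi_bounds xs p bound k lo hloBound
    rw [← hhi] at hhiB
    have hlohi : lo ≤ hi := hhiB.1
    have hhib : hi < bound := hhiB.2
    -- A's prefix: the `if cnt > 0` collapses to a replicate in either case
    have hpre : (if (0 : Int) + (lo - start) > 0 then
        List.replicate ((0 : Int) + (lo - start)).toNat (pvGet xs lo) else []) =
        List.replicate (lo - start).toNat (pvGet xs lo) := by
      split_ifs with h
      · norm_num
      · have : (lo - start).toNat = 0 := by omega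
        rw [this]; rfl
    rw [hpre]
    -- A's suffix: unify the two branches
    have hsuf : (if hi + 1 ≠ endI + 1 then
        (List.replicate (lo - start).toNat (pvGet xs lo) ++
          (PySem.List.pyRange lo (hi + 1) 1).map (pvGet xs)) ++
          List.replicate (endI + 1 - (hi + 1)).toNat (pvGet xs (hi + 1 - 1))
      else List.replicate (lo - start).toNat (pvGet xs lo) ++
          (PySem.List.pyRange lo (hi + 1) 1).map (pvGet xs)) =
        List.replicate (lo - start).toNat (pvGet xs lo) ++
          (PySem.List.pyRange lo (hi + 1) 1).map (pvGet xs) ++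
          List.replicate (endI - hi).toNat (pvGet xs hi) := by
      split_ifs with h
      · have : hi + 1 - 1 = hi := by omega
        rw [this]
        have : endI + 1 - (hi + 1) = endI - hi := by omega
        rw [this]
      · have : (endI - hi).toNat = 0 := by omega
        rw [this]; simp
    rw [hsuf]
    -- B: split the range at lo and hi+1 and evaluate the clamp on each segment
    have hseg1 : (PySem.List.pyRange start lo 1).map
        (fun i => pvGet xs (min (max i lo) hi)) =
        List.replicate (lo - start).toNat (pvGet xs lo) := by
      rw [map_clamp_const _ _ _ (fun i hmem => by
        rw [PySem.List.mem_pyRange_one] at hmem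
        have e1 : max i lo = lo := by omega
        have e2 : min lo hi = lo := by omega
        rw [e1, e2]), PySem.List.length_pyRange_one]
    have hseg2 : (PySem.List.pyRange lo (hi + 1) 1).map
        (fun i => pvGet xs (min (max i lo) hi)) =
        (PySem.List.pyRange lo (hi + 1) 1).map (pvGet xs) := by
      refine List.map_congr_left (fun i hmem => ?_)
      rw [PySem.List.mem_pyRange_one] at hmem
      have e1 : max i lo = i := by omega
      have e2 : min i hi = i := by omega
      rw [e1, e2]
    have hseg3 : (PySem.List.pyRange (hi + 1) (endI + 1) 1).map
        (fun i => pvGet xs (min (max i lo) hi)) =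
        List.replicate (endI - hi).toNat (pvGet xs hi) := by
      rw [map_clamp_const _ _ _ (fun i hmem => by
        rw [PySem.List.mem_pyRange_one] at hmem
        have e1 : max i lo = i := by omega
        have e2 : min i hi = hi := by omega
        rw [e1, e2]), PySem.List.length_pyRange_one]
      congr 1
      omega
    rw [PySem.List.pyRange_one_append start lo (endI + 1) hloB.1 (by omega),
      PySem.List.pyRange_one_append lo (hi + 1) (endI + 1) (by omega) (by omega),
      List.map_append, List.map_append, hseg1, hseg2, hseg3, ← List.append_assoc]
  · -- degenerate case: neighbor_num < 0, both sides are []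
    have hf : (imN - (imN - n)).toNat = 0 := by omega
    rw [hf]
    simp only [aLoop1, bLoopLo]
    rw [aLoop2_done xs _ _ _ _ _ (by omega)]
    have hb : bLoopHi xs (pvPat (pvGet xs imN)) (min (imN + n + 1) (xs.length : Int))
        ((min (imN + n + 1) (xs.length : Int) - 1 - (imN - n)).toNat) (imN - n) = imN - n := by
      have : (min (imN + n + 1) (xs.length : Int) - 1 - (imN - n)).toNat = 0 := by omega
      rw [this]; simp [bLoopHi]
    rw [hb]
    rw [if_pos (by omega : imN - n ≠ imN + n + 1)]
    have hr : (imN + n + 1 - (imN - n)).toNat = 0 := by omega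
    rw [hr, PySem.List.pyRange_one_eq_nil (by omega)]
    simp
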